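-- pv_equiv track=rewrite | github.com/nafeu/activity-roulette | main.py | get_activity_ids_by_tags
-- ===== SOURCE A (Python) =====
-- def get_activity_ids_by_tags(activities, input_tags):
--     output = []
--     for index, tags in enumerate([get_item_tags(item) for item in activities]):
--         for tag in tags:
--             if tag in input_tags:
--                 output.append(index)
--                 break
--     return output
--
-- def get_item_tags(raw_item):
--     tags = raw_item.split(" (")
--     if len(tags) > 1:
--         return [item.strip() for item in tags[1].rstrip(")").split(",")]
--     return []
-- ===== SOURCE B (Python) =====
-- def get_activity_ids_by_tags(activities, input_tags):
--     by_tag = {}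
--     for index, item in enumerate(activities):
--         for tag in get_item_tags(item):
--             by_tag.setdefault(tag, []).append(index)
--     hits = set()
--     for tag in input_tags:
--         hits.update(by_tag.get(tag, []))
--     return sorted(hits)
--
-- def get_item_tags(raw_item):
--     tags = raw_item.split(" (")
--     if len(tags) > 1:
--         return [item.strip() for item in tags[1].rstrip(")").split(",")]
--     return []
-- ===== Notes on version B (the rewrite author's own statement) =====
-- stated objective: alternative
-- what changed: B builds an inverted index (dict tag -> list of activity indices) in one pass over the activities, then answers by looking up each input tag and returning the sorted set of hit indices, replacing A's per-activity scan that membership-tests every tag against input_tags with break.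
import Mathlib
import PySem

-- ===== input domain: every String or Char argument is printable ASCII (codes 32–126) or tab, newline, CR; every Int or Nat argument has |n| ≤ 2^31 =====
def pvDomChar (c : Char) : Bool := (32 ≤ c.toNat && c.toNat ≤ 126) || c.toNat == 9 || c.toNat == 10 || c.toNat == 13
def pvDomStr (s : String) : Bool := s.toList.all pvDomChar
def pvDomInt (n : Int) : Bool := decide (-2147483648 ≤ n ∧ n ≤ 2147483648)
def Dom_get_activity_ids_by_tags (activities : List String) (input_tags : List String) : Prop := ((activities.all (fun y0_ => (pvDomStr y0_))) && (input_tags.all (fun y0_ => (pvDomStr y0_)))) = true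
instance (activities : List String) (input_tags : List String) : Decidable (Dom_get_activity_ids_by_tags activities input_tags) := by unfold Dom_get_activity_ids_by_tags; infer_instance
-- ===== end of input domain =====

-- B builds an inverted index (tag -> indices) over the activities and answers by dict lookup of each
-- input tag, returning the sorted hit set, instead of A's per-activity membership loop with break.

-- ===== PORT A =====
-- exact port of str.rstrip(")"): drop trailing ')' characters
def pvRstripParen (s : String) : String :=
  String.ofList ((s.toList.reverse.dropWhile (fun c => c == ')')).reverse)

def get_item_tags (raw_item : String) : List String :=
  let tags := (PySem.Str.split? raw_item " (").getD []
  if 1 < tags.length then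
    ((PySem.Str.split? (pvRstripParen ((PySem.List.pyGet? tags 1).getD "")) ",").getD []).map
      PySem.Str.strip
  else []

-- A's inner 'for tag in tags: if tag in input_tags: output.append(index); break'
def pvScanTags (input_tags : List String) (index : Int) (tags : List String) (out : List Int) :
    List Int :=
  match tags with
  | [] => out
  | tag :: rest =>
      if input_tags.contains tag then out ++ [index] else pvScanTags input_tags index rest out

def get_activity_ids_by_tags (activities : List String) (input_tags : List String) : List Int :=
  (PySem.List.enumerate (activities.map get_item_tags)).foldl
    (fun out p => pvScanTags input_tags p.1 p.2 out) []

-- ===== PORT B =====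
-- by_tag.setdefault(tag, []).append(index): the list stored at tag grows in place, i.e. the key
-- keeps its position and its value gains index — exactly PySem.Dict.insert with the appended list.
def get_activity_ids_by_tags_alt (activities : List String) (input_tags : List String) :
    List Int :=
  let by_tag : PySem.Dict String (List Int) :=
    (PySem.List.enumerate activities).foldl (fun d p =>
      (get_item_tags p.2).foldl (fun d tag => d.insert tag (d.getD tag [] ++ [p.1])) d)
      PySem.Dict.empty
  let hits : PySem.Set Int :=
    input_tags.foldl (fun hits tag => PySem.Set.update hits (by_tag.getD tag []))
      PySem.Set.empty
  PySem.List.sorted hits (fun x => x)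

-- ===== PRECONDITION & SPEC =====
def Spec_get_activity_ids_by_tags (activities : List String) (input_tags : List String) (out : List Int) : Prop := out = get_activity_ids_by_tags_alt activities input_tags
instance (activities : List String) (input_tags : List String) (out : List Int) : Decidable (Spec_get_activity_ids_by_tags activities input_tags out) := by unfold Spec_get_activity_ids_by_tags; infer_instance

-- ===== CLAIM (what is proved, stated in full; the proofs are below) =====
def Claim_equal_get_activity_ids_by_tags : Prop := ∀ (activities : List String) (input_tags : List String), Dom_get_activity_ids_by_tags activities input_tags → Spec_get_activity_ids_by_tags activities input_tags (get_activity_ids_by_tags activities input_tags)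

-- ===== LEMMAS AND PROOFS =====

-- the list both sides compute: first components of the matching enumerated activities
def pvTarget (activities : List String) (input_tags : List String) : List Int :=
  ((PySem.List.enumerate (activities.map get_item_tags)).filter
    (fun p => p.2.any (fun t => input_tags.contains t))).map (fun p => p.1)

theorem pvScanTags_eq (input_tags : List String) (index : Int) (tags : List String)
    (out : List Int) :
    pvScanTags input_tags index tags out =
      if tags.any (fun t => input_tags.contains t) then out ++ [index] else out := by
  induction tags with
  | nil => simp [pvScanTags]
  | cons t rest ih =>
      rw [pvScanTags, ih]
      by_cases h : t ∈ input_tags <;> simp [h]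

theorem portA_eq_target (activities : List String) (input_tags : List String) :
    get_activity_ids_by_tags activities input_tags = pvTarget activities input_tags := by
  unfold get_activity_ids_by_tags pvTarget
  rw [show (fun (out : List Int) (p : Int × List String) => pvScanTags input_tags p.1 p.2 out) =
      (fun out p => if p.2.any (fun t => input_tags.contains t) then out ++ [p.1] else out) from
      funext fun out => funext fun p => pvScanTags_eq input_tags p.1 p.2 out]
  simpa using PySem.List.foldl_append_if
    (fun p : Int × List String => p.2.any (fun t => input_tags.contains t)) (fun p => p.1)
    (PySem.List.enumerate (activities.map get_item_tags)) []

-- the dict built by B: membership in the value list at a key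
theorem pvDictInner_mem (i : Int) (tags : List String)
    (d : PySem.Dict String (List Int)) (t : String) (x : Int) :
    (x ∈ (tags.foldl (fun d tag => d.insert tag (d.getD tag [] ++ [i])) d).getD t []) ↔
      x ∈ d.getD t [] ∨ (t ∈ tags ∧ x = i) := by
  induction tags generalizing d with
  | nil => simp
  | cons tag rest ih =>
      simp only [List.foldl_cons, ih, PySem.Dict.getD_insert, List.mem_cons]
      by_cases h : t = tag
      · subst h; simp; tauto
      · simp [h]

theorem pvDict_mem (l : List (Int × String)) (d : PySem.Dict String (List Int)) (t : String)
    (x : Int) :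
    (x ∈ (l.foldl (fun d p =>
        (get_item_tags p.2).foldl (fun d tag => d.insert tag (d.getD tag [] ++ [p.1])) d)
        d).getD t []) ↔
      x ∈ d.getD t [] ∨ ∃ p ∈ l, t ∈ get_item_tags p.2 ∧ x = p.1 := by
  induction l generalizing d with
  | nil => simp
  | cons p rest ih =>
      simp only [List.foldl_cons, ih, pvDictInner_mem, List.mem_cons]
      constructor
      · rintro ((hx | ⟨ht, rfl⟩) | ⟨q, hq, htq, hxq⟩)
        · exact Or.inl hx
        · exact Or.inr ⟨p, Or.inl rfl, ht, rfl⟩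
        · exact Or.inr ⟨q, Or.inr hq, htq, hxq⟩
      · rintro (hx | ⟨q, rfl | hq, htq, hxq⟩)
        · exact Or.inl (Or.inl hx)
        · exact Or.inl (Or.inr ⟨htq, hxq⟩)
        · exact Or.inr ⟨q, hq, htq, hxq⟩

-- the set of hits B accumulates from the index
theorem pvHits_mem (d : PySem.Dict String (List Int)) (input_tags : List String)
    (s : PySem.Set Int) (x : Int) :
    (x ∈ input_tags.foldl (fun hits tag => PySem.Set.update hits (d.getD tag [])) s) ↔
      x ∈ s ∨ ∃ tag ∈ input_tags, x ∈ d.getD tag [] := by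
  induction input_tags generalizing s with
  | nil => simp
  | cons tag rest ih =>
      simp only [List.foldl_cons, ih, PySem.Set.mem_update, List.mem_cons]
      constructor
      · rintro ((hx | hx) | ⟨t, ht, hxt⟩)
        · exact Or.inl hx
        · exact Or.inr ⟨tag, Or.inl rfl, hx⟩
        · exact Or.inr ⟨t, Or.inr ht, hxt⟩
      · rintro (hx | ⟨t, rfl | ht, hxt⟩)
        · exact Or.inl (Or.inl hx)
        · exact Or.inl (Or.inr hxt)
        · exact Or.inr ⟨t, ht, hxt⟩

theorem pvHits_nodup (d : PySem.Dict String (List Int)) (input_tags : List String)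
    (s : PySem.Set Int) (hs : s.Nodup) :
    (input_tags.foldl (fun hits tag => PySem.Set.update hits (d.getD tag [])) s).Nodup := by
  induction input_tags generalizing s with
  | nil => exact hs
  | cons tag rest ih => exact ih _ (PySem.Set.nodup_update _ _ hs)

theorem pvTarget_pairwise (activities : List String) (input_tags : List String) :
    (pvTarget activities input_tags).Pairwise (· < ·) := by
  unfold pvTarget
  exact List.Pairwise.map _ (fun a b h => h)
    ((PySem.List.pairwise_lt_enumerate (activities.map get_item_tags) 0).filter _)

theorem pvTarget_mem (activities : List String) (input_tags : List String) (x : Int) :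
    x ∈ pvTarget activities input_tags ↔
      ∃ tag ∈ input_tags, ∃ p ∈ PySem.List.enumerate activities,
        tag ∈ get_item_tags p.2 ∧ x = p.1 := by
  unfold pvTarget
  simp only [List.mem_map, List.mem_filter, List.any_eq_true, PySem.List.mem_enumerate_iff]
  constructor
  · rintro ⟨p, ⟨⟨k, hk, rfl⟩, t, ht, hct⟩, rfl⟩
    simp only [List.getElem_map] at ht
    exact ⟨t, by simpa using hct, (0 + (k : Int), activities[k]'(by simpa using hk)),
      ⟨k, by simpa using hk, by simp⟩, ht, rfl⟩
  · rintro ⟨t, ht, p, ⟨k, hk, rfl⟩, htp, rfl⟩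
    refine ⟨(0 + (k : Int), (activities.map get_item_tags)[k]'(by simpa using hk)),
      ⟨⟨k, by simpa using hk, rfl⟩, t, ?_, by simpa using ht⟩, rfl⟩
    simpa using htp

theorem portB_eq_target (activities : List String) (input_tags : List String) :
    get_activity_ids_by_tags_alt activities input_tags = pvTarget activities input_tags := by
  unfold get_activity_ids_by_tags_alt
  apply PySem.List.sorted_eq_of_perm_of_pairwise_lt
  · apply (List.perm_ext_iff_of_nodup (pvTarget_pairwise activities input_tags).nodup
      (pvHits_nodup _ input_tags PySem.Set.empty (by simp [PySem.Set.empty]))).mpr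
    intro x
    rw [pvTarget_mem, pvHits_mem]
    simp only [pvDict_mem, PySem.Dict.getD_empty, false_or,
      PySem.Set.empty, List.not_mem_nil]
  · exact pvTarget_pairwise activities input_tags

-- ===== VERDICT (by name: the statement is the Claim_ definition above) =====
theorem get_activity_ids_by_tags_spec : Claim_equal_get_activity_ids_by_tags := by
  intro activities input_tags _
  unfold Spec_get_activity_ids_by_tags
  rw [portA_eq_target, portB_eq_target]
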